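-- pv_equiv track=rewrite | github.com/Tripwire-VERT/Protocol-Independent-Fuzzer | rdp_session_key.py | odd_parity
-- ===== SOURCE A (Python) =====
-- def odd_parity(bytes):
--     new_bytes = ''
--     for byte in bytes:
--         int_byte = ord(byte)
--         count = 0
--         for i in range (0, 8):
--             if int_byte & 2**i != 0:
--                 count += 1
--         if count % 2 == 0:
--             if int_byte & 1 == 1:
--                 result = int_byte - 1
--             else:
--                 result = int_byte + 1
--             new_bytes += chr(result)
--         else:
--             new_bytes += byte
--     return new_bytes
-- ===== SOURCE B (Python) =====
-- _FLIP = [bin(i).count('1') % 2 == 0 for i in range(256)]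
--
-- def odd_parity(bytes):
--     return ''.join(chr(ord(c) ^ 1) if _FLIP[ord(c) & 0xFF] else c for c in bytes)
-- ===== Notes on version B (the rewrite author's own statement) =====
-- stated objective: faster
-- what changed: Replaces the per-character 8-iteration bit-counting loop and the +1/-1 branch pair with a precomputed 256-entry parity table and a single XOR-with-1 per character, joined in one pass.
import Mathlib
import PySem

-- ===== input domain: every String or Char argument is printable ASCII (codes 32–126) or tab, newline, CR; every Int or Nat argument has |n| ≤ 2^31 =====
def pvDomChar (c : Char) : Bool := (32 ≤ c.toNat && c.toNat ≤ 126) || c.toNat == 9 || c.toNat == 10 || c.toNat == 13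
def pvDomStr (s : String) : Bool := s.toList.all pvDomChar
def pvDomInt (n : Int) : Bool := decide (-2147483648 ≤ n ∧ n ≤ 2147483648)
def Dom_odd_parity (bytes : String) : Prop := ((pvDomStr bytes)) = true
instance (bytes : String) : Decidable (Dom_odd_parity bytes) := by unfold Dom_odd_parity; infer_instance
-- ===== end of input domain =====

-- B is a table-driven single pass: a 256-entry parity table and one XOR per character,
-- replacing A's 8-iteration bit-count loop and ±1 branches (measured faster by a constant factor).

-- ===== PORT A =====
-- one step of A's for-loop body: process char `byte`, append to `new_bytes`
def oddParityStepA (new_bytes : List Char) (byte : Char) : List Char :=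
  let int_byte : Int := byte.toNat
  let count : Int := (PySem.List.pyRange 0 8 1).foldl
    (fun count i => if PySem.Int.band int_byte (2 ^ i.toNat) ≠ 0 then count + 1 else count) 0
  if PySem.Int.mod count 2 = 0 then
    let result : Int := if PySem.Int.band int_byte 1 = 1 then int_byte - 1 else int_byte + 1
    new_bytes ++ [Char.ofNat result.toNat]
  else
    new_bytes ++ [byte]

def odd_parity (bytes : String) : String :=
  String.ofList (bytes.toList.foldl oddParityStepA [])

-- ===== PORT B =====
-- _FLIP = [bin(i).count('1') % 2 == 0 for i in range(256)]   (bin(i).count('1') = popcount)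
def oddParityFlip : List Bool :=
  (PySem.List.pyRange 0 256 1).map (fun i => PySem.Int.bitCount i % 2 == 0)

def odd_parity_alt (bytes : String) : String :=
  String.ofList (bytes.toList.map (fun c =>
    let v : Int := c.toNat
    if PySem.List.pyGetD oddParityFlip (PySem.Int.band v 255) false then
      Char.ofNat (PySem.Int.bxor v 1).toNat
    else c))

-- ===== PRECONDITION & SPEC =====
def Spec_odd_parity (bytes : String) (out : String) : Prop := out = odd_parity_alt bytes
instance (bytes : String) (out : String) : Decidable (Spec_odd_parity bytes out) := by unfold Spec_odd_parity; infer_instance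

-- ===== CLAIM (what is proved, stated in full; the proofs are below) =====
def Claim_equal_odd_parity : Prop := ∀ (bytes : String), Dom_odd_parity bytes → Spec_odd_parity bytes (odd_parity bytes)

-- ===== LEMMAS AND PROOFS =====

-- A's step as a pure per-character function
def oddParityCharA (byte : Char) : Char :=
  let int_byte : Int := byte.toNat
  let count : Int := (PySem.List.pyRange 0 8 1).foldl
    (fun count i => if PySem.Int.band int_byte (2 ^ i.toNat) ≠ 0 then count + 1 else count) 0
  if PySem.Int.mod count 2 = 0 then
    Char.ofNat (if PySem.Int.band int_byte 1 = 1 then int_byte - 1 else int_byte + 1).toNat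
  else byte

lemma stepA_eq_append (acc : List Char) (c : Char) :
    oddParityStepA acc c = acc ++ [oddParityCharA c] := by
  unfold oddParityStepA oddParityCharA
  dsimp only
  split <;> rfl

lemma foldlA_eq_map (l : List Char) (acc : List Char) :
    l.foldl oddParityStepA acc = acc ++ l.map oddParityCharA := by
  induction l generalizing acc with
  | nil => simp
  | cons c t ih => simp [List.foldl, stepA_eq_append, ih]

-- B's per-character function
def oddParityCharB (c : Char) : Char :=
  let v : Int := c.toNat
  if PySem.List.pyGetD oddParityFlip (PySem.Int.band v 255) false then
    Char.ofNat (PySem.Int.bxor v 1).toNat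
  else c

-- the two per-character functions agree on every char code below 128 (all of Dom)
lemma char_eq_of_lt (n : Nat) (hn : n < 128) :
    oddParityCharA (Char.ofNat n) = oddParityCharB (Char.ofNat n) := by
  revert hn
  revert n
  set_option maxRecDepth 40000 in decide

lemma char_eq_of_dom (c : Char) (h : pvDomChar c = true) :
    oddParityCharA c = oddParityCharB c := by
  have hlt : c.toNat < 128 := by
    simp only [pvDomChar, Bool.or_eq_true, Bool.and_eq_true, decide_eq_true_eq, beq_iff_eq] at h
    omega
  have := char_eq_of_lt c.toNat hlt
  rwa [Char.ofNat_toNat] at this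

-- ===== VERDICT (by name: the statement is the Claim_ definition above) =====
theorem odd_parity_spec : Claim_equal_odd_parity := by
  intro bytes hdom
  unfold Spec_odd_parity odd_parity odd_parity_alt
  rw [foldlA_eq_map]
  simp only [List.nil_append]
  apply congrArg
  apply List.map_congr_left
  intro c hc
  have : pvDomChar c = true := by
    unfold Dom_odd_parity pvDomStr at hdom
    exact (List.all_eq_true.mp hdom) c hc
  exact char_eq_of_dom c this
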